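-- pv_equiv track=rewrite | github.com/BennyJane/algorithm_mad | niuke/huawei/Q2.py | solution36
-- ===== SOURCE A (Python) =====
-- def solution36(target, source):
--     target = target[::-1]
--     source = source[::-1]
--
--     n = len(source)
--     m = len(target)
--     for i, c in enumerate(source):
--         if c != target[0]:
--             continue
--         right = 1
--         for j in range(i + 1, n):
--             if source[j] == target[right]:
--                 right += 1
--             if right >= m:
--                 return n - 1 - j
--     return -1
-- ===== SOURCE B (Python) =====
-- def solution36(target, source):
--     t = len(target)
--     for idx in range(len(source) - 1, -1, -1):
--         if t and source[idx] == target[t - 1]: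
--             t -= 1
--             if t == 0:
--                 return idx
--     return -1
-- ===== Notes on version B (the rewrite author's own statement) =====
-- stated objective: faster
-- what changed: A reverses both strings and, for every occurrence of the reversed target's first character, restarts a fresh inner greedy scan (O(n*m)); B makes a single right-to-left pass over the original source with one target pointer (O(n+m)), with no string reversal and no restarts.
-- intended difference: For a single-character target that occurs in source only at index 0, A's inner loop (which starts after the matched character) never runs so A returns -1, missing the match; B returns 0, the index where the match completes, which is the intended answer. — e.g. on solution36("a", "a"): A returns -1, B returns 0
import Mathlib
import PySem

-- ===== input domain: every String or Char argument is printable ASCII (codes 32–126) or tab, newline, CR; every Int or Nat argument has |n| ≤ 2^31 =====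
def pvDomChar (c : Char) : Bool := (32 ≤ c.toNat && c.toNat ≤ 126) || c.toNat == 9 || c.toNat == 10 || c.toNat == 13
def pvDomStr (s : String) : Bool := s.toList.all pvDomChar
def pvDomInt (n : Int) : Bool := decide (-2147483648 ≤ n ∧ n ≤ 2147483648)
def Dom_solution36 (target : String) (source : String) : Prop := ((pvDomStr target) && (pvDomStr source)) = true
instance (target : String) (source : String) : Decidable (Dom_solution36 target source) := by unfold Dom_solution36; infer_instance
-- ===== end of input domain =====

-- B replaces A's reverse-both-strings + per-occurrence restarted inner scan with one right-to-left
-- pass over source and a single target pointer (objective: faster; the mechanism is the removed restarts).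
-- ===== PORT A =====
-- Inner loop `for j in range(i+1, n)`: returns `some r` where Python returns, `none` when the loop
-- completes. `target[right]` is ported as `PySem.List.pyGet? T right`; where Python raises IndexError there
-- (right ≥ len(target), reachable only outside Pre_) pyGet? is none and the comparison counts as a
-- mismatch instead of raising.
def pvAInner (T : List Char) (n m : Int) : List Char → Int → Int → Option Int
  | [], _, _ => none
  | c :: rest, j, right =>
    let right' := if PySem.List.pyGet? T right = some c then right + 1 else right
    if m ≤ right' then some (n - 1 - j) else pvAInner T n m rest (j + 1) right'

-- Outer loop `for i, c in enumerate(source)`. `target[0]` is `PySem.List.pyGet? T 0`; where Python raises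
-- IndexError (empty target, nonempty source — outside Pre_) the `none ≠ some c` test skips instead.
def pvAOuter (T : List Char) (n m : Int) : List Char → Int → Int
  | [], _ => -1
  | c :: rest, i =>
    if PySem.List.pyGet? T 0 ≠ some c then pvAOuter T n m rest (i + 1)
    else
      match pvAInner T n m rest (i + 1) 1 with
      | some r => r
      | none => pvAOuter T n m rest (i + 1)

def solution36 (target : String) (source : String) : Int :=
  let T := target.toList.reverse      -- target = target[::-1]
  let S := source.toList.reverse      -- source = source[::-1]
  pvAOuter T (S.length : Int) (T.length : Int) S 0

-- ===== PORT B =====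
-- Source B reads source[idx] for idx = n-1, n-2, …, 0: those are exactly the successive elements of the
-- reversed character list, over which the port recurses while counting idx down.
def pvBLoop (Tl : List Char) : List Char → Int → Int → Int
  | [], _, _ => -1
  | c :: rest, idx, t =>
    if t ≠ 0 ∧ PySem.List.pyGet? Tl (t - 1) = some c then
      if t - 1 = 0 then idx else pvBLoop Tl rest (idx - 1) (t - 1)
    else pvBLoop Tl rest (idx - 1) t

def solution36_alt (target : String) (source : String) : Int :=
  pvBLoop target.toList source.toList.reverse ((source.toList.length : Int) - 1)
    (target.toList.length : Int)

-- ===== PRECONDITION & SPEC =====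
-- Pre_ excludes exactly the inputs on which Python A raises IndexError: an empty target with a
-- nonempty source (target[0]), and a length-1 target whose character occurs in source at an
-- index ≥ 1 (target[right] with right = 1).
def Pre_solution36 (target : String) (source : String) : Prop :=
  (target.toList.length = 0 → source.toList = []) ∧
  (target.toList.length = 1 → target.toList.all (fun c => !((source.toList.drop 1).contains c)) = true)

instance (target : String) (source : String) : Decidable (Pre_solution36 target source) := by
  unfold Pre_solution36; infer_instance

def pvWitness_solution36 : String × String := ("ab", "cab")

-- For a single-character target that occurs in source only at index 0, A's inner loop (which starts
-- after the matched character) never runs, so A returns -1 and misses the match; B returns 0, the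
-- index where the match completes, which is the intended answer.
def D_solution36 (target : String) (source : String) : Prop :=
  target.toList.length = 1 ∧ source.toList.head? = target.toList.head?

instance (target : String) (source : String) : Decidable (D_solution36 target source) := by
  unfold D_solution36; infer_instance

def Spec_solution36 (target : String) (source : String) (out : Int) : Prop :=
  ¬ D_solution36 target source → out = solution36_alt target source

instance (target : String) (source : String) (out : Int) : Decidable (Spec_solution36 target source out) := by
  unfold Spec_solution36; infer_instance

def pvDiffWitness_solution36 : String × String := ("a", "a")
def pvDiffWitnessOut_solution36 : Int × Int := (-1, 0)

-- ===== CLAIM (what is proved, stated in full; the proofs are below) =====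
def Claim_unchanged_solution36 : Prop := ∀ (target : String) (source : String), Dom_solution36 target source → Pre_solution36 target source → Spec_solution36 target source (solution36 target source)
def Claim_changed_solution36 : Prop := Dom_solution36 (pvDiffWitness_solution36.1) (pvDiffWitness_solution36.2) ∧ Pre_solution36 (pvDiffWitness_solution36.1) (pvDiffWitness_solution36.2) ∧ D_solution36 (pvDiffWitness_solution36.1) (pvDiffWitness_solution36.2) ∧ solution36 (pvDiffWitness_solution36.1) (pvDiffWitness_solution36.2) = pvDiffWitnessOut_solution36.1 ∧ solution36_alt (pvDiffWitness_solution36.1) (pvDiffWitness_solution36.2) = pvDiffWitnessOut_solution36.2 ∧ pvDiffWitnessOut_solution36.1 ≠ pvDiffWitnessOut_solution36.2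
def Claim_exact_solution36 : Prop := ∀ (target : String) (source : String), Dom_solution36 target source → Pre_solution36 target source → D_solution36 target source → solution36 target source ≠ solution36_alt target source

-- ===== LEMMAS AND PROOFS =====

-- Reference greedy scan both ports are reduced to: match the pattern P (already reversed) against S
-- (the reversed source) left to right, idx counting down; returns the idx completing the match, else -1.
def pvG : List Char → List Char → Int → Int
  | _, [], _ => -1
  | [], _ :: _, _ => -1
  | p :: ps, c :: rest, idx =>
    if p = c then (if ps = [] then idx else pvG ps rest (idx - 1))
    else pvG (p :: ps) rest (idx - 1)

theorem sublist_cons_of_ne {p c : Char} {ps l : List Char} (h : p ≠ c) :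
    (p :: ps).Sublist (c :: l) ↔ (p :: ps).Sublist l := by
  constructor
  · intro hs
    cases hs with
    | cons _ h' => exact h'
    | cons₂ => exact absurd rfl h
  · intro hs; exact hs.cons c

theorem pvG_eq_neg1_iff (S : List Char) : ∀ (p : Char) (ps : List Char) (idx : Int),
    (S.length : Int) ≤ idx + 1 → (pvG (p :: ps) S idx = -1 ↔ ¬ (p :: ps).Sublist S) := by
  induction S with
  | nil => intro p ps idx _; simp [pvG]
  | cons c rest ih =>
    intro p ps idx hlen
    simp only [List.length_cons] at hlen
    push_cast at hlen
    by_cases hpc : p = c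
    · subst hpc
      cases ps with
      | nil =>
        have h1 : pvG [p] (p :: rest) idx = idx := by simp [pvG]
        rw [h1]
        simp only [List.singleton_sublist, List.mem_cons, true_or, not_true_eq_false,
          iff_false]
        omega
      | cons q qs =>
        have hne : (q :: qs : List Char) ≠ [] := by simp
        have h1 : pvG (p :: q :: qs) (p :: rest) idx = pvG (q :: qs) rest (idx - 1) := by
          simp [pvG, hne]
        rw [h1, ih q qs (idx - 1) (by omega), List.cons_sublist_cons]
    · have h1 : pvG (p :: ps) (c :: rest) idx = pvG (p :: ps) rest (idx - 1) := by
        simp [pvG, hpc]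
      rw [h1, ih p ps (idx - 1) (by omega), sublist_cons_of_ne hpc]

theorem pvB_eq_g (S : List Char) : ∀ (Tl : List Char) (idx t : Int), 1 ≤ t → t ≤ Tl.length →
    pvBLoop Tl S idx t = pvG (Tl.take t.toNat).reverse S idx := by
  induction S with
  | nil => intro Tl idx t _ _; simp [pvBLoop, pvG]
  | cons c rest ih =>
    intro Tl idx t h1 ht
    have hklt : (t - 1).toNat < Tl.length := by omega
    have hget : PySem.List.pyGet? Tl (t - 1) = some Tl[(t - 1).toNat] :=
      PySem.List.pyGet?_eq_some_getElem Tl (by omega) (by omega)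
    have hk : t.toNat = (t - 1).toNat + 1 := by omega
    have htake : (Tl.take t.toNat).reverse
        = Tl[(t - 1).toNat] :: (Tl.take (t - 1).toNat).reverse := by
      rw [hk, List.take_add_one, List.reverse_append, List.getElem?_eq_getElem hklt]
      rfl
    rw [htake]
    have hTlne : Tl ≠ [] := by intro h; subst h; simp at hklt
    by_cases hc : Tl[(t - 1).toNat] = c
    · have hcond : (t ≠ 0 ∧ PySem.List.pyGet? Tl (t - 1) = some c) :=
        ⟨by omega, by rw [hget, hc]⟩
      by_cases ht1 : t - 1 = 0
      · have hk0 : (t - 1).toNat = 0 := by omega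
        simp only [pvBLoop]
        rw [if_pos hcond, if_pos ht1]
        have hnil : (Tl.take (t - 1).toNat).reverse = [] := by rw [hk0]; simp
        simp only [pvG]
        rw [if_pos hc, if_pos hnil]
      · have hne : (Tl.take (t - 1).toNat).reverse ≠ [] := by
          simp only [ne_eq, List.reverse_eq_nil_iff, List.take_eq_nil_iff]
          rintro (h | h)
          · omega
          · exact hTlne h
        have hstep : pvG (Tl[(t - 1).toNat] :: (Tl.take (t - 1).toNat).reverse) (c :: rest) idx
            = pvG ((Tl.take (t - 1).toNat).reverse) rest (idx - 1) := by
          simp only [pvG]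
          rw [if_pos hc, if_neg hne]
        simp only [pvBLoop]
        rw [if_pos hcond, if_neg ht1, ih Tl (idx - 1) (t - 1) (by omega) (by omega), hstep]
    · have hcond : ¬ (t ≠ 0 ∧ PySem.List.pyGet? Tl (t - 1) = some c) := by
        rw [hget]
        rintro ⟨-, h⟩
        exact hc (Option.some.inj h)
      have hstep : pvG (Tl[(t - 1).toNat] :: (Tl.take (t - 1).toNat).reverse) (c :: rest) idx
          = pvG (Tl[(t - 1).toNat] :: (Tl.take (t - 1).toNat).reverse) rest (idx - 1) := by
        simp only [pvG]
        rw [if_neg hc]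
      simp only [pvBLoop]
      rw [if_neg hcond, ih Tl (idx - 1) t h1 ht, hstep, ← htake]

theorem pvAInner_eq (S : List Char) : ∀ (T : List Char) (n j right : Int),
    1 ≤ right → right < T.length → (S.length : Int) ≤ n - j →
    pvAInner T n (T.length : Int) S j right =
      (if pvG (T.drop right.toNat) S (n - 1 - j) = -1 then none
       else some (pvG (T.drop right.toNat) S (n - 1 - j))) := by
  induction S with
  | nil => intro T n j right _ _ _; simp [pvAInner, pvG]
  | cons c rest ih =>
    intro T n j right h1 hlt hlen
    simp only [List.length_cons] at hlen
    push_cast at hlen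
    have hrlt : right.toNat < T.length := by omega
    have hget : PySem.List.pyGet? T right = some T[right.toNat] :=
      PySem.List.pyGet?_eq_some_getElem T (by omega) (by omega)
    have hdrop : T.drop right.toNat = T[right.toNat] :: T.drop (right.toNat + 1) :=
      List.drop_eq_getElem_cons hrlt
    by_cases hc : T[right.toNat] = c
    · have hcond : PySem.List.pyGet? T right = some c := by rw [hget, hc]
      by_cases hend : (T.length : Int) ≤ right + 1
      · have hdropnil : T.drop (right.toNat + 1) = [] := by
          apply List.drop_eq_nil_of_le
          omega
        have hG : pvG (T.drop right.toNat) (c :: rest) (n - 1 - j) = n - 1 - j := by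
          rw [hdrop, hdropnil]
          simp [pvG, hc]
        have hA : pvAInner T n (T.length : Int) (c :: rest) j right = some (n - 1 - j) := by
          simp only [pvAInner]
          rw [hcond]
          simp [hend]
        rw [hA, hG, if_neg (by omega : ¬ (n - 1 - j = -1))]
      · have hne : T.drop (right.toNat + 1) ≠ [] := by
          simp only [ne_eq, List.drop_eq_nil_iff]
          omega
        have hG : pvG (T.drop right.toNat) (c :: rest) (n - 1 - j)
            = pvG (T.drop (right.toNat + 1)) rest (n - 1 - (j + 1)) := by
          rw [hdrop]
          simp only [pvG]
          rw [if_pos hc, if_neg hne, show n - 1 - j - 1 = n - 1 - (j + 1) from by ring]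
        have hA : pvAInner T n (T.length : Int) (c :: rest) j right
            = pvAInner T n (T.length : Int) rest (j + 1) (right + 1) := by
          simp only [pvAInner]
          rw [hcond]
          simp [hend]
        rw [hA, ih T n (j + 1) (right + 1) (by omega) (by omega) (by omega), hG]
        rw [show ((right : Int) + 1).toNat = right.toNat + 1 from by omega]
    · have hcond : PySem.List.pyGet? T right ≠ some c := by
        rw [hget]
        intro h
        exact hc (Option.some.inj h)
      have hG : pvG (T.drop right.toNat) (c :: rest) (n - 1 - j)
          = pvG (T.drop right.toNat) rest (n - 1 - (j + 1)) := by
        rw [hdrop]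
        simp only [pvG]
        rw [if_neg hc, ← hdrop, show n - 1 - j - 1 = n - 1 - (j + 1) from by ring]
      have hA : pvAInner T n (T.length : Int) (c :: rest) j right
          = pvAInner T n (T.length : Int) rest (j + 1) right := by
        simp only [pvAInner]
        rw [if_neg hcond, if_neg (by omega : ¬ (T.length : Int) ≤ right)]
      rw [hA, ih T n (j + 1) right h1 hlt (by omega), hG]

theorem pvAOuter_fail (S : List Char) : ∀ (T : List Char) (n i : Int) (q : Char) (qs : List Char),
    T.drop 1 = q :: qs → (S.length : Int) ≤ n - i → ¬ (q :: qs).Sublist S →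
    pvAOuter T n (T.length : Int) S i = -1 := by
  induction S with
  | nil => intro T n i q qs _ _ _; simp [pvAOuter]
  | cons c rest ih =>
    intro T n i q qs hdrop hlen hsub
    simp only [List.length_cons] at hlen
    push_cast at hlen
    have hTlen : 2 ≤ T.length := by
      have h := congrArg List.length hdrop
      simp only [List.length_drop, List.length_cons] at h
      omega
    have hsub' : ¬ (q :: qs).Sublist rest := fun h => hsub (h.cons c)
    by_cases hc : PySem.List.pyGet? T 0 = some c
    · have hinner : pvAInner T n (T.length : Int) rest (i + 1) 1 = none := by
        rw [pvAInner_eq rest T n (i + 1) 1 (by omega) (by omega) (by omega)]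
        have hg : pvG (T.drop (1 : Int).toNat) rest (n - 1 - (i + 1)) = -1 := by
          rw [show (1 : Int).toNat = 1 from rfl, hdrop]
          exact (pvG_eq_neg1_iff rest q qs (n - 1 - (i + 1)) (by omega)).mpr hsub'
        rw [hg]
        simp
      simp only [pvAOuter]
      rw [if_neg (fun h => h hc), hinner]
      exact ih T n (i + 1) q qs hdrop (by omega) hsub'
    · simp only [pvAOuter]
      rw [if_pos hc]
      exact ih T n (i + 1) q qs hdrop (by omega) hsub'

theorem pvAOuter_eq (S : List Char) : ∀ (T : List Char) (n i : Int),
    2 ≤ T.length → (S.length : Int) ≤ n - i →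
    pvAOuter T n (T.length : Int) S i = pvG T S (n - 1 - i) := by
  induction S with
  | nil =>
    intro T n i hT _
    obtain ⟨p, ps, rfl⟩ : ∃ p ps, T = p :: ps := by
      cases T with
      | nil => simp at hT
      | cons a as => exact ⟨a, as, rfl⟩
    simp [pvAOuter, pvG]
  | cons c rest ih =>
    intro T n i hT hlen
    obtain ⟨p, ps, rfl⟩ : ∃ p ps, T = p :: ps := by
      cases T with
      | nil => simp at hT
      | cons a as => exact ⟨a, as, rfl⟩
    obtain ⟨q, qs, rfl⟩ : ∃ q qs, ps = q :: qs := by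
      cases ps with
      | nil => simp at hT
      | cons a as => exact ⟨a, as, rfl⟩
    simp only [List.length_cons] at hlen
    push_cast at hlen
    have hget0 : PySem.List.pyGet? (p :: q :: qs) 0 = some p := PySem.List.pyGet?_zero_cons p (q :: qs)
    by_cases hc : p = c
    · have hcond : ¬ (PySem.List.pyGet? (p :: q :: qs) 0 ≠ some c) := by
        rw [hget0, hc]
        simp
      have hinner := pvAInner_eq rest (p :: q :: qs) n (i + 1) 1 (by omega)
        (by simp only [List.length_cons]; push_cast; omega) (by omega)
      rw [show ((1 : Int).toNat) = 1 from rfl] at hinner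
      rw [show (p :: q :: qs).drop 1 = q :: qs from rfl] at hinner
      by_cases hv : pvG (q :: qs) rest (n - 1 - (i + 1)) = -1
      · have hA : pvAOuter (p :: q :: qs) n ((p :: q :: qs).length : Int) (c :: rest) i = -1 := by
          simp only [pvAOuter]
          rw [if_neg hcond, hinner, if_pos hv]
          exact pvAOuter_fail rest (p :: q :: qs) n (i + 1) q qs rfl (by omega)
            ((pvG_eq_neg1_iff rest q qs (n - 1 - (i + 1)) (by omega)).mp hv)
        rw [hA]
        have hG : pvG (p :: q :: qs) (c :: rest) (n - 1 - i) = pvG (q :: qs) rest (n - 1 - i - 1) := by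
          simp only [pvG]
          rw [if_pos hc, if_neg (by simp : (q :: qs : List Char) ≠ [])]
        rw [hG, show n - 1 - i - 1 = n - 1 - (i + 1) from by ring, hv]
      · have hA : pvAOuter (p :: q :: qs) n ((p :: q :: qs).length : Int) (c :: rest) i
            = pvG (q :: qs) rest (n - 1 - (i + 1)) := by
          simp only [pvAOuter]
          rw [if_neg hcond, hinner, if_neg hv]
        rw [hA]
        have hG : pvG (p :: q :: qs) (c :: rest) (n - 1 - i) = pvG (q :: qs) rest (n - 1 - i - 1) := by
          simp only [pvG]
          rw [if_pos hc, if_neg (by simp : (q :: qs : List Char) ≠ [])]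
        rw [hG, show n - 1 - i - 1 = n - 1 - (i + 1) from by ring]
    · have hcond : PySem.List.pyGet? (p :: q :: qs) 0 ≠ some c := by
        rw [hget0]
        simp [hc]
      simp only [pvAOuter]
      rw [if_pos hcond, ih (p :: q :: qs) n (i + 1) hT (by omega)]
      have hG : pvG (p :: q :: qs) (c :: rest) (n - 1 - i) = pvG (p :: q :: qs) rest (n - 1 - i - 1) := by
        simp only [pvG]
        rw [if_neg hc]
      rw [hG, show n - 1 - i - 1 = n - 1 - (i + 1) from by ring]

theorem pvA_single (c : Char) (S : List Char) : ∀ (n i : Int), c ∉ S →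
    pvAOuter [c] n 1 S i = -1 := by
  induction S with
  | nil => intro n i _; simp [pvAOuter]
  | cons d rest ih =>
    intro n i hmem
    simp only [List.mem_cons, not_or] at hmem
    have hcond : PySem.List.pyGet? [c] 0 ≠ some d := by
      rw [PySem.List.pyGet?_zero_cons]
      simp
      intro h
      exact hmem.1 h
    simp only [pvAOuter]
    rw [if_pos hcond]
    exact ih n (i + 1) hmem.2

theorem pvB_single (c : Char) (S : List Char) : ∀ (idx : Int), c ∉ S →
    pvBLoop [c] S idx 1 = -1 := by
  induction S with
  | nil => intro idx _; simp [pvBLoop]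
  | cons d rest ih =>
    intro idx hmem
    simp only [List.mem_cons, not_or] at hmem
    have hcond : ¬ ((1 : Int) ≠ 0 ∧ PySem.List.pyGet? [c] (1 - 1) = some d) := by
      rw [show (1 : Int) - 1 = 0 from rfl, PySem.List.pyGet?_zero_cons]
      rintro ⟨-, h⟩
      exact hmem.1 (Option.some.inj h)
    simp only [pvBLoop]
    rw [if_neg hcond]
    exact ih (idx - 1) hmem.2

theorem pvA_single_end (c : Char) (L : List Char) : ∀ (n i : Int), c ∉ L →
    pvAOuter [c] n 1 (L ++ [c]) i = -1 := by
  induction L with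
  | nil =>
    intro n i _
    simp only [List.nil_append, pvAOuter]
    rw [if_neg (by rw [PySem.List.pyGet?_zero_cons]; simp)]
    simp [pvAInner]
  | cons d rest ih =>
    intro n i hmem
    simp only [List.mem_cons, not_or] at hmem
    have hcond : PySem.List.pyGet? [c] 0 ≠ some d := by
      rw [PySem.List.pyGet?_zero_cons]
      simp
      intro h
      exact hmem.1 h
    simp only [List.cons_append, pvAOuter]
    rw [if_pos hcond]
    exact ih n (i + 1) hmem.2

theorem pvB_single_end (c : Char) (L : List Char) : ∀ (idx : Int), c ∉ L →
    pvBLoop [c] (L ++ [c]) idx 1 = idx - L.length := by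
  induction L with
  | nil =>
    intro idx _
    simp only [List.nil_append, pvBLoop]
    rw [if_pos ⟨by omega, by rw [show (1 : Int) - 1 = 0 from rfl, PySem.List.pyGet?_zero_cons]⟩,
      if_pos (by omega : (1 : Int) - 1 = 0)]
    simp
  | cons d rest ih =>
    intro idx hmem
    simp only [List.mem_cons, not_or] at hmem
    have hcond : ¬ ((1 : Int) ≠ 0 ∧ PySem.List.pyGet? [c] (1 - 1) = some d) := by
      rw [show (1 : Int) - 1 = 0 from rfl, PySem.List.pyGet?_zero_cons]
      rintro ⟨-, h⟩
      exact hmem.1 (Option.some.inj h)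
    simp only [List.cons_append, pvBLoop]
    rw [if_neg hcond, ih (idx - 1) hmem.2]
    simp only [List.length_cons]
    push_cast
    ring

-- ===== VERDICT (by name: the statement is the Claim_ definition above) =====
theorem solution36_spec : Claim_unchanged_solution36 := by
  intro target source _ hpre hnd
  obtain ⟨hpre0, hpre1⟩ := hpre
  cases hTl : target.toList with
  | nil =>
    have hs : source.toList = [] := hpre0 (by rw [hTl]; rfl)
    simp [solution36, solution36_alt, hTl, hs, pvAOuter, pvBLoop]
  | cons a as =>
    cases as with
    | nil =>
      have hlen1 : target.toList.length = 1 := by rw [hTl]; rfl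
      have hnotin1 : a ∉ source.toList.drop 1 := by
        have h := hpre1 hlen1
        rw [hTl] at h
        simpa using h
      have hheadne : source.toList.head? ≠ some a := fun h =>
        hnd ⟨hlen1, by rw [h, hTl]; rfl⟩
      have hnotin : a ∉ source.toList := by
        intro hmem
        cases hsrc : source.toList with
        | nil => rw [hsrc] at hmem; simp at hmem
        | cons b bs =>
          rw [hsrc] at hmem
          rcases List.mem_cons.mp hmem with rfl | hmem'
          · exact hheadne (by rw [hsrc]; rfl)
          · exact hnotin1 (by rw [hsrc]; simpa using hmem')
      have hA : solution36 target source = -1 := by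
        simp only [solution36, hTl, List.reverse_singleton, List.length_singleton, Nat.cast_one]
        exact pvA_single a _ _ 0 (by simpa using hnotin)
      have hB : solution36_alt target source = -1 := by
        simp only [solution36_alt, hTl, List.length_singleton, Nat.cast_one]
        exact pvB_single a _ _ (by simpa using hnotin)
      rw [hA, hB]
    | cons b bs =>
      have hT2 : 2 ≤ target.toList.length := by rw [hTl]; simp
      have hT2r : 2 ≤ target.toList.reverse.length := by simpa using hT2
      have hA : solution36 target source
          = pvG target.toList.reverse source.toList.reverse
              ((source.toList.reverse.length : Int) - 1 - 0) := by
        simp only [solution36]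
        exact pvAOuter_eq _ _ _ 0 hT2r (by omega)
      have hB : solution36_alt target source
          = pvG (target.toList.take ((target.toList.length : Int)).toNat).reverse
              source.toList.reverse ((source.toList.length : Int) - 1) := by
        simp only [solution36_alt]
        exact pvB_eq_g _ _ _ _ (by omega) (by omega)
      rw [hA, hB,
        show ((target.toList.length : Int)).toNat = target.toList.length from by omega,
        List.take_length,
        show ((source.toList.reverse.length : Int) - 1 - 0) = ((source.toList.length : Int) - 1) from by
          simp only [List.length_reverse]; omega]

theorem solution36_changed : Claim_changed_solution36 := by
  unfold Claim_changed_solution36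
  simp only [pvDiffWitness_solution36, pvDiffWitnessOut_solution36]
  decide

theorem solution36_tight : Claim_exact_solution36 := by
  intro target source _ hpre hd
  obtain ⟨hlen1, hhead⟩ := hd
  obtain ⟨a, hTl⟩ := List.length_eq_one_iff.mp hlen1
  rw [hTl] at hhead
  obtain ⟨rest, hsrc⟩ : ∃ rest, source.toList = a :: rest := by
    cases hs : source.toList with
    | nil => rw [hs] at hhead; simp at hhead
    | cons b bs =>
      rw [hs] at hhead
      simp only [List.head?_cons] at hhead
      exact ⟨bs, by rw [Option.some.inj hhead]⟩
  have hnotin : a ∉ rest := by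
    have h := hpre.2 (by rw [hTl]; rfl)
    rw [hTl, hsrc] at h
    simpa using h
  have hrevsrc : source.toList.reverse = rest.reverse ++ [a] := by rw [hsrc]; simp
  have hnotinrev : a ∉ rest.reverse := by simpa using hnotin
  have hA : solution36 target source = -1 := by
    simp only [solution36, hTl, List.reverse_singleton, List.length_singleton, Nat.cast_one,
      hrevsrc]
    exact pvA_single_end a _ _ 0 hnotinrev
  have hB : solution36_alt target source = 0 := by
    have hstep : solution36_alt target source
        = pvBLoop [a] (rest.reverse ++ [a]) ((source.toList.length : Int) - 1) 1 := by
      simp only [solution36_alt, hTl, List.length_singleton, Nat.cast_one, hrevsrc]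
    rw [hstep, pvB_single_end a _ _ hnotinrev, hsrc]
    simp only [List.length_cons, List.length_reverse]
    omega
  rw [hA, hB]
  decide
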